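-- pv_equiv track=rewrite | github.com/junes7/python_algorithm | 프로그래머스/0/181890. 왼쪽 오른쪽/왼쪽 오른쪽.py | solution
-- ===== SOURCE A (Python) =====
-- def solution(str_list):
--     d=['l','r']
--     l=[]
--     for i,c in enumerate(str_list):
--         if c==d[0]:
--             l=str_list[:i]
--             break
--         elif c==d[1]:
--             l=str_list[i+1:]
--             break
--     return l
-- ===== SOURCE B (Python) =====
-- def solution(str_list):
--     il = str_list.index('l') if 'l' in str_list else None
--     ir = str_list.index('r') if 'r' in str_list else None
--     if il is None:
--         return [] if ir is None else str_list[ir + 1:]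
--     if ir is None or il < ir:
--         return str_list[:il]
--     return str_list[ir + 1:]
-- ===== Notes on version B (the rewrite author's own statement) =====
-- stated objective: simpler
-- what changed: Replaces the decide-on-the-fly enumerate scan with a find-both-landmarks-then-compare decomposition: compute the first index of 'l' and of 'r' up front, then pick the slice by comparing them, with no in-loop branching.
import Mathlib
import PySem

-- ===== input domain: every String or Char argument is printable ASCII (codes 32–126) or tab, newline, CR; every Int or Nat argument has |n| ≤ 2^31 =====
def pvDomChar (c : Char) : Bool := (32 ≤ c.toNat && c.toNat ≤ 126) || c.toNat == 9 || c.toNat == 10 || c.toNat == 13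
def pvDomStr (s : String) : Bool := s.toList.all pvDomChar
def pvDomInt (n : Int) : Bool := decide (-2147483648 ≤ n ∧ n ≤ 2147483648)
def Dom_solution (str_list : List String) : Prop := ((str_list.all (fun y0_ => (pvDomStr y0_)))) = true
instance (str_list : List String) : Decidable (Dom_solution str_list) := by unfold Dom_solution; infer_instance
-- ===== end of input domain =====

-- B replaces A's decide-on-the-fly scan with up-front first-index lookups for 'l' and 'r' and a single comparison (objective: simpler).


-- ===== PORT A =====
-- the for-loop over enumerate(str_list) with break
def solutionLoop (str_list : List String) : List (Int × String) → List String
  | [] => []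
  | (i, c) :: rest =>
    if c = "l" then PySem.List.slice str_list none (some i)
    else if c = "r" then PySem.List.slice str_list (some (i + 1)) none
    else solutionLoop str_list rest

def solution (str_list : List String) : List String :=
  solutionLoop str_list (PySem.List.enumerate str_list)

-- ===== PORT B =====
def solution_alt (str_list : List String) : List String :=
  let il := if str_list.contains "l" then PySem.List.index? str_list "l" else none
  let ir := if str_list.contains "r" then PySem.List.index? str_list "r" else none
  match il, ir with
  | none, none => []
  | none, some j => PySem.List.slice str_list (some ((j : Int) + 1)) none
  | some i, none => PySem.List.slice str_list none (some (i : Int))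
  | some i, some j =>
    if i < j then PySem.List.slice str_list none (some (i : Int))
    else PySem.List.slice str_list (some ((j : Int) + 1)) none

-- ===== PRECONDITION & SPEC =====
def Spec_solution (str_list : List String) (out : List String) : Prop := out = solution_alt str_list
instance (str_list : List String) (out : List String) : Decidable (Spec_solution str_list out) := by unfold Spec_solution; infer_instance

-- ===== CLAIM (what is proved, stated in full; the proofs are below) =====
def Claim_equal_solution : Prop := ∀ (str_list : List String), Dom_solution str_list → Spec_solution str_list (solution str_list)

-- ===== LEMMAS AND PROOFS =====

-- the loop returns [] when it never sees "l" or "r"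
lemma loop_none (orig xs : List String) (s : Int)
    (h : ∀ x ∈ xs, x ≠ "l" ∧ x ≠ "r") :
    solutionLoop orig (PySem.List.enumerate xs s) = [] := by
  induction xs generalizing s with
  | nil => simp [PySem.List.enumerate_nil, solutionLoop]
  | cons a xs ih =>
    obtain ⟨h1, h2⟩ := h a (by simp)
    rw [PySem.List.enumerate_cons]
    simp only [solutionLoop, if_neg h1, if_neg h2]
    exact ih _ (fun x hx => h x (List.mem_cons_of_mem _ hx))

-- the loop breaks at the first "l" when nothing before it is "l" or "r"
lemma loop_break_l (orig pre suf : List String) (s : Int)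
    (h : ∀ x ∈ pre, x ≠ "l" ∧ x ≠ "r") :
    solutionLoop orig (PySem.List.enumerate (pre ++ "l" :: suf) s)
      = PySem.List.slice orig none (some (s + pre.length)) := by
  induction pre generalizing s with
  | nil => simp [PySem.List.enumerate_cons, solutionLoop]
  | cons a pre ih =>
    obtain ⟨h1, h2⟩ := h a (by simp)
    rw [List.cons_append, PySem.List.enumerate_cons]
    simp only [solutionLoop, if_neg h1, if_neg h2]
    rw [ih _ (fun x hx => h x (List.mem_cons_of_mem _ hx))]
    congr 2
    simp only [List.length_cons]
    push_cast
    ring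

-- the loop breaks at the first "r" when nothing before it is "l" or "r"
lemma loop_break_r (orig pre suf : List String) (s : Int)
    (h : ∀ x ∈ pre, x ≠ "l" ∧ x ≠ "r") :
    solutionLoop orig (PySem.List.enumerate (pre ++ "r" :: suf) s)
      = PySem.List.slice orig (some (s + pre.length + 1)) none := by
  induction pre generalizing s with
  | nil => simp [PySem.List.enumerate_cons, solutionLoop]
  | cons a pre ih =>
    obtain ⟨h1, h2⟩ := h a (by simp)
    rw [List.cons_append, PySem.List.enumerate_cons]
    simp only [solutionLoop, if_neg h1, if_neg h2]
    rw [ih _ (fun x hx => h x (List.mem_cons_of_mem _ hx))]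
    congr 2
    simp only [List.length_cons]
    push_cast
    ring

-- ===== VERDICT (by name: the statement is the Claim_ definition above) =====
theorem solution_spec : Claim_equal_solution := by
  intro xs _
  unfold Spec_solution solution solution_alt
  by_cases hl : "l" ∈ xs <;> by_cases hr : "r" ∈ xs
  · -- both present
    obtain ⟨i, hi⟩ := Option.isSome_iff_exists.mp ((PySem.List.index?_isSome_iff _ _).mpr hl)
    obtain ⟨j, hj⟩ := Option.isSome_iff_exists.mp ((PySem.List.index?_isSome_iff _ _).mpr hr)
    simp only [List.contains_eq_mem, hl, hr, decide_true, if_true, hi, hj]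
    obtain ⟨hilt, hxi, -⟩ := PySem.List.getElem_of_index?_eq_some hi
    obtain ⟨hjlt, hxj, -⟩ := PySem.List.getElem_of_index?_eq_some hj
    have hij : i ≠ j := fun h => by subst h; rw [hxi] at hxj; exact absurd hxj (by decide)
    rcases lt_or_gt_of_ne hij with hlt | hgt
    · -- first "l" before first "r": break on "l"
      obtain ⟨pre, suf, hdec, hlen, hnl⟩ := (PySem.List.index?_eq_some_iff (k := _) (xs := _) (v := _)).mp hi
      have hpre : ∀ x ∈ pre, x ≠ "l" ∧ x ≠ "r" := by
        intro x hx
        refine ⟨fun h => hnl (h ▸ hx), fun h => ?_⟩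
        have h1 := PySem.List.index?_append_of_mem ("l" :: suf) (h ▸ hx)
        rw [← hdec, hj] at h1
        obtain ⟨hjlt', -, -⟩ := PySem.List.getElem_of_index?_eq_some h1.symm
        omega
      have := loop_break_l xs pre suf 0 hpre
      rw [hdec] at this ⊢
      rw [this, if_pos hlt, hlen]
      norm_num
    · -- first "r" before first "l": break on "r"
      obtain ⟨pre, suf, hdec, hlen, hnr⟩ := (PySem.List.index?_eq_some_iff (k := _) (xs := _) (v := _)).mp hj
      have hpre : ∀ x ∈ pre, x ≠ "l" ∧ x ≠ "r" := by
        intro x hx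
        refine ⟨fun h => ?_, fun h => hnr (h ▸ hx)⟩
        have h1 := PySem.List.index?_append_of_mem ("r" :: suf) (h ▸ hx)
        rw [← hdec, hi] at h1
        obtain ⟨hilt', -, -⟩ := PySem.List.getElem_of_index?_eq_some h1.symm
        omega
      have := loop_break_r xs pre suf 0 hpre
      rw [hdec] at this ⊢
      rw [this, if_neg (by omega), hlen]
      norm_num
  · -- only "l"
    obtain ⟨i, hi⟩ := Option.isSome_iff_exists.mp ((PySem.List.index?_isSome_iff _ _).mpr hl)
    obtain ⟨pre, suf, hdec, hlen, hnl⟩ := PySem.List.index?_eq_some_iff (k := _) (xs := _) (v := _).mp hi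
    have hpre : ∀ x ∈ pre, x ≠ "l" ∧ x ≠ "r" := by
      intro x hx
      refine ⟨fun h => hnl (h ▸ hx), fun h => hr ?_⟩
      rw [hdec]; exact List.mem_append_left _ (h ▸ hx)
    simp only [List.contains_eq_mem, hl, hr, decide_true, decide_false,
      Bool.false_eq_true, if_true, if_false, hi]
    have := loop_break_l xs pre suf 0 hpre
    rw [hdec] at this ⊢
    rw [this, hlen]
    norm_num
  · -- only "r"
    obtain ⟨j, hj⟩ := Option.isSome_iff_exists.mp ((PySem.List.index?_isSome_iff _ _).mpr hr)
    obtain ⟨pre, suf, hdec, hlen, hnr⟩ := PySem.List.index?_eq_some_iff (k := _) (xs := _) (v := _).mp hj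
    have hpre : ∀ x ∈ pre, x ≠ "l" ∧ x ≠ "r" := by
      intro x hx
      refine ⟨fun h => hl ?_, fun h => hnr (h ▸ hx)⟩
      rw [hdec]; exact List.mem_append_left _ (h ▸ hx)
    simp only [List.contains_eq_mem, hl, hr, decide_true, decide_false,
      Bool.false_eq_true, if_true, if_false, hj]
    have := loop_break_r xs pre suf 0 hpre
    rw [hdec] at this ⊢
    rw [this, hlen]
    norm_num
  · -- neither
    simp only [List.contains_eq_mem, hl, hr, decide_false, Bool.false_eq_true, if_false]
    exact loop_none xs xs 0 (fun x hx => ⟨fun h => hl (h ▸ hx), fun h => hr (h ▸ hx)⟩)
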